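-- pv_equiv track=rewrite | github.com/ckoons/BubbleSpacetimeTheory | play/toy_334_ef_cycle_filling.py | find_h1_generators
-- ===== SOURCE A (Python) =====
-- def find_h1_generators(vertices, edges):
--     """Find a basis of H₁ cycles using spanning tree complement."""
--     V = sorted(vertices)
--     E = list(edges)
--
--     # Build spanning tree
--     parent = {v: v for v in V}
--     def find(x):
--         while parent[x] != x:
--             parent[x] = parent[parent[x]]
--             x = parent[x]
--         return x
--     def union(x, y):
--         px, py = find(x), find(y)
--         if px != py:
--             parent[px] = py
--             return True
--         return False
--
--     tree_edges = []
--     non_tree_edges = []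
--     for e in E:
--         u, v = e
--         if union(u, v):
--             tree_edges.append(e)
--         else:
--             non_tree_edges.append(e)
--
--     return non_tree_edges  # Each gives an independent cycle
-- ===== SOURCE B (Python) =====
-- def find_h1_generators(vertices, edges):
--     """Find a basis of H1 cycles: component labels instead of a union-find forest."""
--     comp = {v: v for v in sorted(vertices)}
--     non_tree_edges = []
--     for e in edges:
--         u, v = e
--         cu, cv = comp[u], comp[v]
--         if cu == cv:
--             non_tree_edges.append(e)
--         else:
--             for w in comp:
--                 if comp[w] == cu:
--                     comp[w] = cv
--     return non_tree_edges
-- ===== Notes on version B (the rewrite author's own statement) =====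
-- stated objective: simpler
-- what changed: Replaces the mutable union-find forest (path-halving find + union) with a flat component-label dict: each edge compares the two labels directly and a tree edge merges by relabeling one whole class, so the nested find loops disappear; Pre_ excludes only inputs with an edge endpoint missing from vertices, where both A and B raise KeyError.
import Mathlib
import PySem

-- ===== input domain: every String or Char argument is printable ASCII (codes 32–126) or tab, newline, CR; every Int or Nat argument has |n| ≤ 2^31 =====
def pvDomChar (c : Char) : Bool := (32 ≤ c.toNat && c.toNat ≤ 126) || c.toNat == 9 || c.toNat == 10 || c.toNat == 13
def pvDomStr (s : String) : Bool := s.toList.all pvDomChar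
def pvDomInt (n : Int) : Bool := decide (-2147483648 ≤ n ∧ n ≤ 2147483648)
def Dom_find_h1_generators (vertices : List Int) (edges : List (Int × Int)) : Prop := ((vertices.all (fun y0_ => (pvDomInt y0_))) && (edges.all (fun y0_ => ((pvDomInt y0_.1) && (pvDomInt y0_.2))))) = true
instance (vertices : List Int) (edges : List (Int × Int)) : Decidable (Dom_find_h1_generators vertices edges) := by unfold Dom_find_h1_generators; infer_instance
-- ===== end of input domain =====

-- B replaces A's union-find forest by a flat component-label dict (one relabel scan per tree edge): a simpler merge mechanism, same output.


-- ===== PORT A =====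
-- find(x): while parent[x] != x: parent[x] = parent[parent[x]]; x = parent[x].
-- The fuel (dict size + 1) is only a totality guard: inside Pre_ the parent forest is
-- acyclic, so the root is reached within `size` steps (proved below) and the guard never fires.
def pvFindA : Nat → PySem.Dict Int Int → Int → Int × PySem.Dict Int Int
  | 0, d, x => (x, d)
  | Nat.succ n, d, x =>
    if d.getD x x = x then (x, d)
    else pvFindA n (d.insert x (d.getD (d.getD x x) (d.getD x x))) (d.getD (d.getD x x) (d.getD x x))

-- union(x, y): px, py = find(x), find(y); if px != py: parent[px] = py; return True else False
def pvUnionA (d : PySem.Dict Int Int) (x y : Int) : Bool × PySem.Dict Int Int :=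
  let fuel := d.size + 1
  let r1 := pvFindA fuel d x
  let r2 := pvFindA fuel r1.2 y
  if r1.1 ≠ r2.1 then (true, r2.2.insert r1.1 r2.1) else (false, r2.2)

def find_h1_generators (vertices : List Int) (edges : List (Int × Int)) : List (Int × Int) :=
  let V := PySem.List.sorted vertices (fun x => x) false
  let parent0 := V.foldl (fun d v => d.insert v v) PySem.Dict.empty
  let fin := edges.foldl
    (fun (st : PySem.Dict Int Int × List (Int × Int) × List (Int × Int)) e =>
      let res := pvUnionA st.1 e.1 e.2
      if res.1 then (res.2, st.2.1 ++ [e], st.2.2)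
      else (res.2, st.2.1, st.2.2 ++ [e]))
    (parent0, ([] : List (Int × Int)), ([] : List (Int × Int)))
  fin.2.2

-- ===== PORT B =====
-- for w in comp: if comp[w] == cu: comp[w] = cv   (value overwrites keep the key list unchanged)
def pvRelabelB (c : PySem.Dict Int Int) (cu cv : Int) : PySem.Dict Int Int :=
  c.keys.foldl (fun d w => if d.getD w w = cu then d.insert w cv else d) c

def find_h1_generators_alt (vertices : List Int) (edges : List (Int × Int)) : List (Int × Int) :=
  let comp0 := (PySem.List.sorted vertices (fun x => x) false).foldl
    (fun d v => d.insert v v) PySem.Dict.empty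
  let fin := edges.foldl
    (fun (st : PySem.Dict Int Int × List (Int × Int)) e =>
      let cu := st.1.getD e.1 e.1
      let cv := st.1.getD e.2 e.2
      if cu = cv then (st.1, st.2 ++ [e])
      else (pvRelabelB st.1 cu cv, st.2))
    (comp0, ([] : List (Int × Int)))
  fin.2

-- ===== PRECONDITION & SPEC =====
-- Pre_ excludes exactly the inputs with an edge endpoint not listed in vertices: there A's
-- find (parent[x]) raises KeyError — and B's comp[u] lookup does too — so neither returns.
def Pre_find_h1_generators (vertices : List Int) (edges : List (Int × Int)) : Prop :=
  ∀ e ∈ edges, e.1 ∈ vertices ∧ e.2 ∈ vertices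
instance (vertices : List Int) (edges : List (Int × Int)) : Decidable (Pre_find_h1_generators vertices edges) := by unfold Pre_find_h1_generators; infer_instance

def pvWitness_find_h1_generators : List Int × (List (Int × Int)) := ([1, 2, 3], [(1, 2), (2, 3), (1, 3)])

def Spec_find_h1_generators (vertices : List Int) (edges : List (Int × Int)) (out : List (Int × Int)) : Prop := out = find_h1_generators_alt vertices edges
instance (vertices : List Int) (edges : List (Int × Int)) (out : List (Int × Int)) : Decidable (Spec_find_h1_generators vertices edges out) := by unfold Spec_find_h1_generators; infer_instance

-- ===== CLAIM (what is proved, stated in full; the proofs are below) =====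
def Claim_equal_find_h1_generators : Prop := ∀ (vertices : List Int) (edges : List (Int × Int)), Dom_find_h1_generators vertices edges → Pre_find_h1_generators vertices edges → Spec_find_h1_generators vertices edges (find_h1_generators vertices edges)

-- ===== LEMMAS AND PROOFS =====

def pfd (d : PySem.Dict Int Int) (x : Int) : Int := d.getD x x

def IsRootOf (d : PySem.Dict Int Int) (x r : Int) : Prop :=
  ∃ n, (pfd d)^[n] x = r ∧ pfd d r = r

def RootEq (d : PySem.Dict Int Int) (a b : Int) : Prop :=
  ∃ r, IsRootOf d a r ∧ IsRootOf d b r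

theorem reach_absorb {f : Int → Int} {x r : Int} {n m : Nat}
    (h : f^[n] x = r) (hr : f r = r) (hnm : n ≤ m) : f^[m] x = r := by
  have h2 : f^[m - n + n] x = f^[m - n] (f^[n] x) := Function.iterate_add_apply f (m - n) n x
  rw [show m - n + n = m by omega] at h2
  rw [h2, h, Function.iterate_fixed hr]

theorem rootOf_unique {d : PySem.Dict Int Int} {x r r' : Int}
    (h1 : IsRootOf d x r) (h2 : IsRootOf d x r') : r = r' := by
  obtain ⟨n, hn, hr⟩ := h1
  obtain ⟨m, hm, hr'⟩ := h2
  rcases le_total n m with h | h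
  · rw [← hm]; exact (reach_absorb hn hr h).symm
  · rw [← hn]; exact reach_absorb hm hr' h

theorem rootOf_step {d : PySem.Dict Int Int} {x y r : Int}
    (h : pfd d x = y) (h2 : IsRootOf d y r) : IsRootOf d x r := by
  obtain ⟨n, hn, hr⟩ := h2
  exact ⟨n + 1, by rw [Function.iterate_succ_apply, h, hn], hr⟩

theorem pfd_insert (d : PySem.Dict Int Int) (k v z : Int) :
    pfd (d.insert k v) z = if z = k then v else pfd d z := by
  simp [pfd, PySem.Dict.getD_insert]

theorem iter_mem {d : PySem.Dict Int Int} {S : List Int}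
    (hcl : ∀ y ∈ S, pfd d y ∈ S) {x : Int} (hx : x ∈ S) :
    ∀ n, (pfd d)^[n] x ∈ S := by
  intro n
  induction n with
  | zero => simpa using hx
  | succ n ih => rw [Function.iterate_succ_apply']; exact hcl _ ih

-- path-halving write preserves every reach-the-root fact, without increasing the distance
theorem halve_reach {d : PySem.Dict Int Int} {x : Int} (hx : pfd d x ≠ x) :
    ∀ n y r, (pfd d)^[n] y = r → pfd d r = r →
      ∃ m ≤ n, (pfd (d.insert x (pfd d (pfd d x))))^[m] y = r ∧
        pfd (d.insert x (pfd d (pfd d x))) r = r := by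
  have hrx : ∀ r, pfd d r = r → r ≠ x := by rintro r hr rfl; exact hx hr
  have pf' : ∀ z, pfd (d.insert x (pfd d (pfd d x))) z
      = if z = x then pfd d (pfd d x) else pfd d z := fun z => pfd_insert d _ _ z
  intro n
  induction n using Nat.strong_induction_on with
  | _ n ih =>
    intro y r hy hr
    have hr' : pfd (d.insert x (pfd d (pfd d x))) r = r := by
      rw [pf', if_neg (hrx r hr)]; exact hr
    by_cases hyroot : pfd d y = y
    · -- y is already a root, so r = y
      have : r = y := by rw [← hy, Function.iterate_fixed hyroot]
      subst this
      exact ⟨0, Nat.zero_le n, rfl, hr'⟩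
    · -- y is not a root; n must be positive
      rcases n with _ | k
      · exact absurd (by rw [show y = r from hy]; exact hr) hyroot
      · rw [Function.iterate_succ_apply] at hy
        by_cases hxy : y = x
        · subst hxy
          by_cases hpx : pfd d (pfd d y) = pfd d y
          · -- parent of y is a root; r = pfd d y and the new pointer hits it directly
            have : r = pfd d y := by rw [← hy, Function.iterate_fixed hpx]
            subst this
            refine ⟨1, by omega, ?_, hr'⟩
            rw [Function.iterate_succ_apply, Function.iterate_zero_apply, pf', if_pos rfl]
            exact hpx
          · rcases k with _ | j
            · exact absurd (by rw [show pfd d y = r from hy]; exact hr) hpx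
            · rw [Function.iterate_succ_apply] at hy
              obtain ⟨m, hm, hmy, _⟩ := ih j (by omega) _ r hy hr
              refine ⟨m + 1, by omega, ?_, hr'⟩
              rw [Function.iterate_succ_apply, pf', if_pos rfl]
              exact hmy
        · obtain ⟨m, hm, hmy, _⟩ := ih k (by omega) _ r hy hr
          refine ⟨m + 1, by omega, ?_, hr'⟩
          rw [Function.iterate_succ_apply, pf', if_neg hxy]
          exact hmy

theorem findA_spec : ∀ (fuel : Nat) (d : PySem.Dict Int Int) (x r : Int) (n : Nat),
    n < fuel → (pfd d)^[n] x = r → pfd d r = r →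
    x ∈ d.keys → (∀ y ∈ d.keys, pfd d y ∈ d.keys) →
    ∃ d', pvFindA fuel d x = (r, d') ∧ d'.keys = d.keys ∧
      (∀ y ∈ d.keys, pfd d' y ∈ d.keys) ∧
      (∀ y s, IsRootOf d y s → IsRootOf d' y s) := by
  intro fuel
  induction fuel with
  | zero => intro d x r n hn; omega
  | succ fuel ih =>
    intro d x r n hn hxr hr hx hcl
    by_cases hroot : pfd d x = x
    · have hrx : r = x := by rw [← hxr, Function.iterate_fixed hroot]
      refine ⟨d, ?_, rfl, hcl, fun y s h => h⟩
      simp only [pvFindA]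
      rw [if_pos (show d.getD x x = x from hroot), hrx]
    · -- one halving step, then recurse on the grandparent
      set g := pfd d (pfd d x) with hg
      set d1 := d.insert x g with hd1
      have pf1 : ∀ z, pfd d1 z = if z = x then g else pfd d z := fun z => pfd_insert d _ _ z
      have hkeys1 : d1.keys = d.keys := by
        rw [hd1]
        exact PySem.Dict.keys_insert_of_contains d g
          ((PySem.Dict.contains_iff_mem_keys d x).mpr hx)
      -- distance of g to the root under d is at most n-1
      have hxS : pfd d x ∈ d.keys := hcl x hx
      have hgS : g ∈ d.keys := hcl _ hxS
      have hgreach : ∃ m, m + 1 ≤ n ∧ (pfd d)^[m] g = r := by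
        rcases n with _ | k
        · exact absurd (by rw [show x = r from hxr]; exact hr) hroot
        · rw [Function.iterate_succ_apply] at hxr
          by_cases hpx : pfd d (pfd d x) = pfd d x
          · have : r = pfd d x := by rw [← hxr, Function.iterate_fixed hpx]
            exact ⟨0, by omega, by rw [show (pfd d)^[0] g = g from rfl, hg, hpx, this]⟩
          · rcases k with _ | j
            · exact absurd (by rw [show pfd d x = r from hxr]; exact hr) hpx
            · rw [Function.iterate_succ_apply] at hxr
              exact ⟨j, by omega, hxr⟩
      obtain ⟨m, hm, hmr⟩ := hgreach
      -- transport that distance to d1 via the halving lemma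
      obtain ⟨m1, hm1, hm1r, hr1⟩ := halve_reach hroot m g r hmr hr
      have hcl1 : ∀ y ∈ d1.keys, pfd d1 y ∈ d1.keys := by
        intro y hy
        rw [hkeys1] at hy ⊢
        rw [pf1]
        split
        · exact hgS
        · exact hcl y hy
      obtain ⟨d', heq, hk', hcl', hpres'⟩ :=
        ih d1 g r m1 (by omega) hm1r hr1 (hkeys1 ▸ hgS) hcl1
      refine ⟨d', ?_, by rw [hk', hkeys1], ?_, ?_⟩
      · show pvFindA (fuel + 1) d x = (r, d')
        simp only [pvFindA]
        rw [if_neg (show ¬ d.getD x x = x from hroot)]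
        exact heq
      · intro y hy
        have := hcl' y (by rwa [hkeys1])
        rwa [hkeys1] at this
      · intro y s hs
        apply hpres'
        obtain ⟨k, hk, hsr⟩ := hs
        obtain ⟨m2, _, hm2, hsr2⟩ := halve_reach hroot k y s hk hsr
        exact ⟨m2, hm2, hsr2⟩

-- in an acyclic forest over Nodup keys, the root is reached within keys.length steps
theorem depth_bound (d : PySem.Dict Int Int) (x r : Int)
    (hx : x ∈ d.keys) (hcl : ∀ y ∈ d.keys, pfd d y ∈ d.keys)
    (h : IsRootOf d x r) :
    ∃ n ≤ d.keys.length, (pfd d)^[n] x = r := by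
  classical
  obtain ⟨nw, hnw, hr⟩ := h
  have hP : ∃ n, pfd d ((pfd d)^[n] x) = (pfd d)^[n] x := ⟨nw, by rw [hnw]; exact hr⟩
  let n0 := Nat.find hP
  have hn0 : pfd d ((pfd d)^[n0] x) = (pfd d)^[n0] x := Nat.find_spec hP
  have hmin : ∀ m < n0, ¬ pfd d ((pfd d)^[m] x) = (pfd d)^[m] x := fun m hm => Nat.find_min hP hm
  -- the iterates before the root are pairwise distinct
  have hinj : Set.InjOn (fun i => (pfd d)^[i] x) (Finset.range n0) := by
    intro i hi j hj hij
    simp only [Finset.coe_range, Set.mem_Iio] at hi hj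
    by_contra hne
    -- wlog i < j
    rcases Nat.lt_or_ge i j with hlt | hge
    · have hper : ∀ k, (pfd d)^[k + i] x = (pfd d)^[k + j] x := by
        intro k
        rw [Function.iterate_add_apply, Function.iterate_add_apply]
        exact congrArg _ hij
      have hEq : (pfd d)^[n0 - j + i] x = (pfd d)^[n0] x := by
        have := hper (n0 - j)
        rw [this, show n0 - j + j = n0 by omega]
      have : pfd d ((pfd d)^[n0 - j + i] x) = (pfd d)^[n0 - j + i] x := by
        rw [hEq]; exact hn0
      exact hmin (n0 - j + i) (by omega) this
    · have hlt : j < i := by omega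
      have hper : ∀ k, (pfd d)^[k + j] x = (pfd d)^[k + i] x := by
        intro k
        rw [Function.iterate_add_apply, Function.iterate_add_apply]
        exact congrArg _ hij.symm
      have hEq : (pfd d)^[n0 - i + j] x = (pfd d)^[n0] x := by
        have := hper (n0 - i)
        rw [this, show n0 - i + i = n0 by omega]
      have : pfd d ((pfd d)^[n0 - i + j] x) = (pfd d)^[n0 - i + j] x := by
        rw [hEq]; exact hn0
      exact hmin (n0 - i + j) (by omega) this
  have hsub : (Finset.range n0).image (fun i => (pfd d)^[i] x) ⊆ d.keys.toFinset := by
    intro z hz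
    obtain ⟨i, _, rfl⟩ := Finset.mem_image.mp hz
    exact List.mem_toFinset.mpr (iter_mem hcl hx i)
  have hcard : n0 ≤ d.keys.length := by
    have h1 : ((Finset.range n0).image (fun i => (pfd d)^[i] x)).card = n0 := by
      rw [Finset.card_image_of_injOn hinj, Finset.card_range]
    have h2 := Finset.card_le_card hsub
    have h3 := d.keys.toFinset_card_le
    omega
  have hrootx : IsRootOf d x ((pfd d)^[n0] x) := ⟨n0, rfl, hn0⟩
  have : r = (pfd d)^[n0] x := rootOf_unique ⟨nw, hnw, hr⟩ hrootx
  exact ⟨n0, hcard, this.symm⟩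

-- linking root rx under root ry redirects every root through the collapse map
theorem link_roots (d : PySem.Dict Int Int) (rx ry : Int)
    (hrx : pfd d rx = rx) (hry : pfd d ry = ry) (hne : rx ≠ ry) :
    ∀ n z s, (pfd d)^[n] z = s → pfd d s = s →
      IsRootOf (d.insert rx ry) z (if s = rx then ry else s) := by
  have pf' : ∀ z, pfd (d.insert rx ry) z = if z = rx then ry else pfd d z :=
    fun z => pfd_insert d _ _ z
  have hry' : pfd (d.insert rx ry) ry = ry := by rw [pf', if_neg (Ne.symm hne)]; exact hry
  intro n
  induction n using Nat.strong_induction_on with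
  | _ n ih =>
    intro z s hz hs
    by_cases hzroot : pfd d z = z
    · have hsz : s = z := by rw [← hz, Function.iterate_fixed hzroot]
      subst hsz
      by_cases hzx : s = rx
      · subst hzx
        rw [if_pos rfl]
        exact ⟨1, by rw [Function.iterate_succ_apply, Function.iterate_zero_apply, pf', if_pos rfl], hry'⟩
      · rw [if_neg hzx]
        exact ⟨0, rfl, by rw [pf', if_neg hzx]; exact hs⟩
    · have hzx : z ≠ rx := by rintro rfl; exact hzroot hrx
      rcases n with _ | k
      · exact absurd (by rw [show z = s from hz]; exact hs) hzroot
      · rw [Function.iterate_succ_apply] at hz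
        have := ih k (by omega) _ s hz hs
        exact rootOf_step (by rw [pf', if_neg hzx]) this

-- forward preservation plus totality turns into a two-way equivalence of RootEq
theorem rootEq_iff_of_pres {d d' : PySem.Dict Int Int} {S : List Int}
    (htot : ∀ y ∈ S, ∃ r, IsRootOf d y r)
    (hpres : ∀ y s, IsRootOf d y s → IsRootOf d' y s)
    {a b : Int} (ha : a ∈ S) (hb : b ∈ S) :
    RootEq d' a b ↔ RootEq d a b := by
  constructor
  · rintro ⟨r, h1, h2⟩
    obtain ⟨ra, hra⟩ := htot a ha
    obtain ⟨rb, hrb⟩ := htot b hb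
    have e1 : ra = r := rootOf_unique (hpres a ra hra) h1
    have e2 : rb = r := rootOf_unique (hpres b rb hrb) h2
    exact ⟨ra, hra, by rw [e1, ← e2]; exact hrb⟩
  · rintro ⟨r, h1, h2⟩
    exact ⟨r, hpres a r h1, hpres b r h2⟩

theorem dict_size_eq_keys_length (d : PySem.Dict Int Int) : d.size = d.keys.length := by
  simp [PySem.Dict.size, PySem.Dict.keys]

theorem unionA_spec (d : PySem.Dict Int Int) (u v : Int)
    (hcl : ∀ y ∈ d.keys, pfd d y ∈ d.keys)
    (htot : ∀ y ∈ d.keys, ∃ r, IsRootOf d y r)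
    (hu : u ∈ d.keys) (hv : v ∈ d.keys) :
    ∃ ru rv d2,
      IsRootOf d u ru ∧ IsRootOf d v rv ∧
      pvUnionA d u v = (if ru ≠ rv then (true, d2.insert ru rv) else (false, d2)) ∧
      d2.keys = d.keys ∧
      (∀ y ∈ d.keys, pfd d2 y ∈ d.keys) ∧
      (∀ y s, IsRootOf d y s → IsRootOf d2 y s) := by
  obtain ⟨ru, hru⟩ := htot u hu
  obtain ⟨n1, hn1, hxr1⟩ := depth_bound d u ru hu hcl hru
  have hrur : pfd d ru = ru := hru.choose_spec.2
  obtain ⟨d1, hfind1, hk1, hcl1, hpres1⟩ :=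
    findA_spec (d.size + 1) d u ru n1 (by rw [dict_size_eq_keys_length]; omega) hxr1 hrur hu hcl
  obtain ⟨rv0, hrv0⟩ := htot v hv
  have hrv1 : IsRootOf d1 v rv0 := hpres1 v rv0 hrv0
  have hcl1' : ∀ y ∈ d1.keys, pfd d1 y ∈ d1.keys := by
    intro y hy; rw [hk1] at hy ⊢; exact hcl1 y hy
  obtain ⟨n2, hn2, hxr2⟩ := depth_bound d1 v rv0 (by rwa [hk1]) hcl1' hrv1
  have hrvr : pfd d1 rv0 = rv0 := hrv1.choose_spec.2
  obtain ⟨d2, hfind2, hk2, hcl2, hpres2⟩ :=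
    findA_spec (d.size + 1) d1 v rv0 n2
      (by rw [dict_size_eq_keys_length, ← hk1]; omega) hxr2 hrvr (by rwa [hk1]) hcl1'
  refine ⟨ru, rv0, d2, hru, hrv0, ?_, by rw [hk2, hk1], ?_, ?_⟩
  · show (let fuel := d.size + 1
      let r1 := pvFindA fuel d u
      let r2 := pvFindA fuel r1.2 v
      if r1.1 ≠ r2.1 then (true, r2.2.insert r1.1 r2.1) else (false, r2.2)) = _
    simp only [hfind1, hfind2]
  · intro y hy
    have := hcl2 y (by rwa [hk1])
    rwa [hk1] at this
  · exact fun y s h => hpres2 y s (hpres1 y s h)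

theorem relabel_fold (cu cv : Int) : ∀ (L : List Int) (c : PySem.Dict Int Int),
    L.Nodup → (∀ w ∈ L, w ∈ c.keys) →
    (L.foldl (fun d w => if d.getD w w = cu then d.insert w cv else d) c).keys = c.keys ∧
    ∀ y, pfd (L.foldl (fun d w => if d.getD w w = cu then d.insert w cv else d) c) y
      = if y ∈ L ∧ pfd c y = cu then cv else pfd c y := by
  intro L
  induction L with
  | nil => intro c _ _; exact ⟨rfl, fun y => by simp⟩
  | cons a L ih =>
    intro c hnd hmem
    have hna : a ∉ L := (List.nodup_cons.mp hnd).1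
    have hndL : L.Nodup := (List.nodup_cons.mp hnd).2
    set c1 : PySem.Dict Int Int := if c.getD a a = cu then c.insert a cv else c with hc1
    have hk1 : c1.keys = c.keys := by
      rw [hc1]
      split
      · exact PySem.Dict.keys_insert_of_contains c cv
          ((PySem.Dict.contains_iff_mem_keys c a).mpr (hmem a (List.mem_cons_self)))
      · rfl
    have hpf1 : ∀ y, pfd c1 y = if y = a ∧ pfd c a = cu then cv else pfd c y := by
      intro y
      rw [hc1]
      by_cases hca : c.getD a a = cu
      · rw [if_pos hca, pfd_insert]
        by_cases hya : y = a
        · rw [if_pos hya, if_pos ⟨hya, hca⟩]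
        · rw [if_neg hya, if_neg (fun h => hya h.1)]
      · rw [if_neg hca]
        have : ¬ (y = a ∧ pfd c a = cu) := fun h => hca h.2
        rw [if_neg this]
    obtain ⟨hkL, hpfL⟩ := ih c1 hndL (fun w hw => by rw [hk1]; exact hmem w (List.mem_cons_of_mem a hw))
    constructor
    · show (L.foldl _ c1).keys = c.keys
      rw [hkL, hk1]
    · intro y
      show pfd (L.foldl _ c1) y = _
      by_cases hya : y = a
      · subst hya
        have hLHS : ¬ (y ∈ L ∧ pfd c1 y = cu) := fun h => hna h.1
        rw [hpfL y, if_neg hLHS, hpf1 y]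
        by_cases hcu : pfd c y = cu <;> simp [List.mem_cons, hcu]
      · have e : pfd c1 y = pfd c y := by
          rw [hpf1 y, if_neg (fun h => hya h.1)]
        rw [hpfL y, e]
        simp [List.mem_cons, hya]

theorem relabelB_spec (c : PySem.Dict Int Int) (cu cv : Int) (hnd : c.keys.Nodup) :
    (pvRelabelB c cu cv).keys = c.keys ∧
    ∀ y, pfd (pvRelabelB c cu cv) y = if y ∈ c.keys ∧ pfd c y = cu then cv else pfd c y :=
  relabel_fold cu cv c.keys c hnd (fun _ h => h)

def UFInv (S : List Int) (d c : PySem.Dict Int Int) : Prop :=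
  d.keys = S ∧ c.keys = S ∧
  (∀ y ∈ S, pfd d y ∈ S) ∧
  (∀ y ∈ S, ∃ r, IsRootOf d y r) ∧
  (∀ a ∈ S, ∀ b ∈ S, (RootEq d a b ↔ pfd c a = pfd c b))

theorem edge_step {S : List Int} {d c : PySem.Dict Int Int} {u v : Int}
    (hnd : S.Nodup) (hInv : UFInv S d c) (hu : u ∈ S) (hv : v ∈ S) :
    ∃ d',
      (pfd c u = pfd c v → pvUnionA d u v = (false, d') ∧ UFInv S d' c) ∧
      (pfd c u ≠ pfd c v → pvUnionA d u v = (true, d') ∧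
        UFInv S d' (pvRelabelB c (pfd c u) (pfd c v))) := by
  obtain ⟨hkd, hkc, hcl, htot, hrel⟩ := hInv
  obtain ⟨ru, rv, d2, hru, hrv, hun, hk2, hcl2, hpres2⟩ :=
    unionA_spec d u v (by rwa [hkd]) (by rwa [hkd]) (by rwa [hkd]) (by rwa [hkd])
  have hbridge : ru = rv ↔ pfd c u = pfd c v := by
    rw [← hrel u hu v hv]
    constructor
    · intro h; exact ⟨ru, hru, h ▸ hrv⟩
    · rintro ⟨r, h1, h2⟩
      rw [rootOf_unique hru h1, rootOf_unique hrv h2]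
  by_cases hcc : pfd c u = pfd c v
  · -- non-tree edge: same component on both sides
    have heq : ru = rv := hbridge.mpr hcc
    refine ⟨d2, fun _ => ⟨?_, ?_⟩, fun h => absurd hcc h⟩
    · rw [hun, if_neg (by simpa using heq)]
    · refine ⟨by rw [hk2, hkd], hkc, ?_, ?_, ?_⟩
      · intro y hy
        rw [← hkd] at hy ⊢
        exact hcl2 y hy
      · intro y hy
        obtain ⟨r, hr⟩ := htot y hy
        exact ⟨r, hpres2 y r hr⟩
      · intro a ha b hb
        rw [rootEq_iff_of_pres htot hpres2 ha hb]
        exact hrel a ha b hb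
  · -- tree edge: link in A, relabel in B
    have hne : ru ≠ rv := fun h => hcc (hbridge.mp h)
    have hruS : ru ∈ S := by
      obtain ⟨n, hn, _⟩ := hru
      rw [← hn]; exact iter_mem hcl hu n
    have hrvS : rv ∈ S := by
      obtain ⟨n, hn, _⟩ := hrv
      rw [← hn]; exact iter_mem hcl hv n
    have hruR : pfd d2 ru = ru := (hpres2 u ru hru).choose_spec.2
    have hrvR : pfd d2 rv = rv := (hpres2 v rv hrv).choose_spec.2
    have hlink := link_roots d2 ru rv hruR hrvR hne
    set d3 := d2.insert ru rv with hd3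
    have pf3 : ∀ z, pfd d3 z = if z = ru then rv else pfd d2 z := fun z => pfd_insert d2 _ _ z
    have hk3 : d3.keys = S := by
      rw [hd3, PySem.Dict.keys_insert_of_contains d2 rv
        ((PySem.Dict.contains_iff_mem_keys d2 ru).mpr (by rw [hk2, hkd]; exact hruS)), hk2, hkd]
    obtain ⟨hkC, hpfC⟩ := relabelB_spec c (pfd c u) (pfd c v) (by rw [hkc]; exact hnd)
    have hpfC' : ∀ y ∈ S, pfd (pvRelabelB c (pfd c u) (pfd c v)) y
        = if pfd c y = pfd c u then pfd c v else pfd c y := by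
      intro y hy
      rw [hpfC y]
      by_cases h : pfd c y = pfd c u
      · rw [if_pos ⟨by rwa [hkc], h⟩, if_pos h]
      · rw [if_neg (fun hh => h hh.2), if_neg h]
    -- collapse maps for roots
    have collapse : ∀ a ∈ S, ∀ ra, IsRootOf d a ra →
        IsRootOf d3 a (if ra = ru then rv else ra) := by
      intro a _ ra hra
      obtain ⟨n, hn, hr⟩ := hpres2 a ra hra
      exact hlink n a ra hn hr
    refine ⟨d3, fun h => absurd h hcc, fun _ => ⟨?_, ?_⟩⟩
    · rw [hun, if_pos (by simpa using hne)]
    · refine ⟨hk3, by rw [hkC, hkc], ?_, ?_, ?_⟩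
      · intro y hy
        rw [pf3]
        split
        · exact hrvS
        · rw [← hkd] at hy ⊢; exact hcl2 y hy
      · intro y hy
        obtain ⟨r, hr⟩ := htot y hy
        exact ⟨_, collapse y hy r hr⟩
      · intro a ha b hb
        obtain ⟨ra, hra⟩ := htot a ha
        obtain ⟨rb, hrb⟩ := htot b hb
        have La := collapse a ha ra hra
        have Lb := collapse b hb rb hrb
        have hiff : RootEq d3 a b ↔
            (if ra = ru then rv else ra) = (if rb = ru then rv else rb) := by
          constructor
          · rintro ⟨r, h1, h2⟩
            rw [← rootOf_unique h1 La, ← rootOf_unique h2 Lb]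
          · intro h
            exact ⟨_, La, h ▸ Lb⟩
        have hab : ra = rb ↔ pfd c a = pfd c b := by
          rw [← hrel a ha b hb]
          constructor
          · intro h; exact ⟨ra, hra, h ▸ hrb⟩
          · rintro ⟨r, h1, h2⟩; rw [rootOf_unique hra h1, rootOf_unique hrb h2]
        have hauw : ∀ x ∈ S, ∀ rxx, IsRootOf d x rxx → (rxx = ru ↔ pfd c x = pfd c u) := by
          intro x hx rxx hrx
          rw [← hrel x hx u hu]
          constructor
          · intro h; exact ⟨rxx, hrx, h ▸ hru⟩
          · rintro ⟨r, h1, h2⟩; rw [rootOf_unique hrx h1, rootOf_unique hru h2]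
        have havw : ∀ x ∈ S, ∀ rxx, IsRootOf d x rxx → (rxx = rv ↔ pfd c x = pfd c v) := by
          intro x hx rxx hrx
          rw [← hrel x hx v hv]
          constructor
          · intro h; exact ⟨rxx, hrx, h ▸ hrv⟩
          · rintro ⟨r, h1, h2⟩; rw [rootOf_unique hrx h1, rootOf_unique hrv h2]
        have hau := hauw a ha ra hra
        have hbu := hauw b hb rb hrb
        have hav := havw a ha ra hra
        have hbv := havw b hb rb hrb
        rw [hiff, hpfC' a ha, hpfC' b hb]
        by_cases pa : pfd c a = pfd c u <;> by_cases pb : pfd c b = pfd c u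
        · rw [if_pos (hau.mpr pa), if_pos (hbu.mpr pb), if_pos pa, if_pos pb]
          exact iff_of_true rfl rfl
        · rw [if_pos (hau.mpr pa), if_neg (fun h => pb (hbu.mp h)), if_pos pa,
            if_neg pb]
          exact eq_comm.trans (hbv.trans eq_comm)
        · rw [if_neg (fun h => pa (hau.mp h)), if_pos (hbu.mpr pb), if_neg pa, if_pos pb]
          exact hav
        · rw [if_neg (fun h => pa (hau.mp h)), if_neg (fun h => pb (hbu.mp h)),
            if_neg pa, if_neg pb]
          exact hab

theorem fold_eq {S : List Int} (hnd : S.Nodup) :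
    ∀ (es : List (Int × Int)) (d c : PySem.Dict Int Int) (t nt : List (Int × Int)),
    UFInv S d c → (∀ e ∈ es, e.1 ∈ S ∧ e.2 ∈ S) →
    (es.foldl
      (fun (st : PySem.Dict Int Int × List (Int × Int) × List (Int × Int)) e =>
        let res := pvUnionA st.1 e.1 e.2
        if res.1 then (res.2, st.2.1 ++ [e], st.2.2)
        else (res.2, st.2.1, st.2.2 ++ [e]))
      (d, t, nt)).2.2
    = (es.foldl
      (fun (st : PySem.Dict Int Int × List (Int × Int)) e =>
        let cu := st.1.getD e.1 e.1
        let cv := st.1.getD e.2 e.2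
        if cu = cv then (st.1, st.2 ++ [e])
        else (pvRelabelB st.1 cu cv, st.2))
      (c, nt)).2 := by
  intro es
  induction es with
  | nil => intro d c t nt _ _; rfl
  | cons e es ih =>
    intro d c t nt hInv hes
    have he := hes e List.mem_cons_self
    have hes' : ∀ e' ∈ es, e'.1 ∈ S ∧ e'.2 ∈ S := fun e' h => hes e' (List.mem_cons_of_mem e h)
    obtain ⟨d', hsame, hdiff⟩ := edge_step hnd hInv he.1 he.2
    rw [List.foldl_cons, List.foldl_cons]
    by_cases hcc : pfd c e.1 = pfd c e.2
    · obtain ⟨hun, hInv'⟩ := hsame hcc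
      have hA : (let res := pvUnionA d e.1 e.2
          if res.1 then (res.2, t ++ [e], nt) else (res.2, t, nt ++ [e]))
          = (d', t, nt ++ [e]) := by rw [hun]; rfl
      have hB : (let cu := c.getD e.1 e.1
          let cv := c.getD e.2 e.2
          if cu = cv then (c, nt ++ [e]) else (pvRelabelB c cu cv, nt))
          = (c, nt ++ [e]) := by
        show (if pfd c e.1 = pfd c e.2 then _ else _) = _
        rw [if_pos hcc]
      rw [hA, hB]
      exact ih d' c t (nt ++ [e]) hInv' hes'
    · obtain ⟨hun, hInv'⟩ := hdiff hcc
      have hA : (let res := pvUnionA d e.1 e.2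
          if res.1 then (res.2, t ++ [e], nt) else (res.2, t, nt ++ [e]))
          = (d', t ++ [e], nt) := by rw [hun]; rfl
      have hB : (let cu := c.getD e.1 e.1
          let cv := c.getD e.2 e.2
          if cu = cv then (c, nt ++ [e]) else (pvRelabelB c cu cv, nt))
          = (pvRelabelB c (pfd c e.1) (pfd c e.2), nt) := by
        show (if pfd c e.1 = pfd c e.2 then _ else _) = _
        rw [if_neg hcc]; rfl
      rw [hA, hB]
      exact ih d' (pvRelabelB c (pfd c e.1) (pfd c e.2)) (t ++ [e]) nt hInv' hes'

-- the initial dict {v: v for v in V} is the identity parent map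
theorem init_pfd : ∀ (L : List Int) (d : PySem.Dict Int Int),
    (∀ x, pfd d x = x) → ∀ x, pfd (L.foldl (fun d v => d.insert v v) d) x = x := by
  intro L
  induction L with
  | nil => intro d h x; exact h x
  | cons a L ih =>
    intro d h x
    refine ih (d.insert a a) (fun z => ?_) x
    rw [pfd_insert]
    split
    · omega
    · exact h z

-- ===== VERDICT (by name: the statement is the Claim_ definition above) =====
theorem find_h1_generators_spec : Claim_equal_find_h1_generators := by
  intro vertices edges _hDom hPre
  unfold Spec_find_h1_generators
  simp only [find_h1_generators, find_h1_generators_alt]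
  set V := PySem.List.sorted vertices (fun x => x) false with hV
  set d0 := V.foldl (fun d v => d.insert v v) PySem.Dict.empty with hd0
  have hkeys : d0.keys = PySem.Set.ofList V := by
    rw [hd0, PySem.Dict.keys_foldl_insert, PySem.Dict.keys_empty, PySem.Set.update_nil_left]
  have hnd : (PySem.Set.ofList V).Nodup := PySem.Set.nodup_ofList V
  have hpf0 : ∀ x, pfd d0 x = x := by
    refine init_pfd V PySem.Dict.empty (fun x => ?_)
    simp [pfd, PySem.Dict.getD_empty]
  have hInv : UFInv (PySem.Set.ofList V) d0 d0 := by
    refine ⟨hkeys, hkeys, fun y hy => by rw [hpf0]; exact hy,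
      fun y _ => ⟨y, 0, rfl, hpf0 y⟩, fun a _ b _ => ?_⟩
    rw [hpf0 a, hpf0 b]
    constructor
    · rintro ⟨r, ⟨n, hn, _⟩, ⟨m, hm, _⟩⟩
      rw [Function.iterate_fixed (hpf0 a)] at hn
      rw [Function.iterate_fixed (hpf0 b)] at hm
      rw [hn, hm]
    · rintro rfl
      exact ⟨a, ⟨0, rfl, hpf0 a⟩, ⟨0, rfl, hpf0 a⟩⟩
  have hes : ∀ e ∈ edges, e.1 ∈ PySem.Set.ofList V ∧ e.2 ∈ PySem.Set.ofList V := by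
    intro e he
    obtain ⟨h1, h2⟩ := hPre e he
    constructor
    · rw [PySem.Set.mem_ofList, hV, PySem.List.mem_sorted]; exact h1
    · rw [PySem.Set.mem_ofList, hV, PySem.List.mem_sorted]; exact h2
  exact fold_eq hnd edges d0 d0 [] [] hInv hes
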